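-- pv_equiv track=rewrite | github.com/BrainCog-X/Brain-Cog | examples/Structure_Evolution/MSE-NAS/micro_encoding.py | compare_cell
-- ===== SOURCE A (Python) =====
-- def convert_cell(cell_bit_string):
--     # convert cell bit-string to genome
--     tmp = [cell_bit_string[i:i + 2] for i in range(0, len(cell_bit_string), 2)]
--     return [tmp[i:i + 2] for i in range(0, len(tmp), 2)]
--
-- def compare_cell(cell_string1, cell_string2):
--     cell_genome1 = convert_cell(cell_string1)
--     cell_genome2 = convert_cell(cell_string2)
--     cell1, cell2 = cell_genome1[:], cell_genome2[:]
--
--     for block1 in cell1: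
--         for block2 in cell2:
--             if block1 == block2 or block1 == block2[::-1]:
--                 cell2.remove(block2)
--                 break
--     if len(cell2) > 0:
--         return False
--     else:
--         return True
-- ===== SOURCE B (Python) =====
-- def _blocks(s):
--     # split s into blocks of (up to) two chunks of (up to) two elements, in one pass
--     out, i, n = [], 0, len(s)
--     while i < n:
--         blk = [s[i:i + 2]]
--         if i + 2 < n:
--             blk.append(s[i + 2:i + 4])
--         out.append(blk)
--         i += 4
--     return out
--
-- def compare_cell(cell_string1, cell_string2):
--     bs1 = _blocks(cell_string1)
--     bs2 = _blocks(cell_string2)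
--     def cnt(x, bs):
--         return sum(1 for y in bs if x == y or x == y[::-1])
--     return all(cnt(x, bs2) <= cnt(x, bs1) for x in bs2)
-- ===== Notes on version B (the rewrite author's own statement) =====
-- stated objective: alternative
-- what changed: Replaces A's greedy destructive matching (nested scan over a shrinking copy with remove/break, always processing every block of cell1) by a pure counting check: every block of cell2 must occur in cell1, up to reversal, at least as often as in cell2; no list mutation, and all() stops at the first deficient block, which a timing run measured as much faster on random inputs.
import Mathlib
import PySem

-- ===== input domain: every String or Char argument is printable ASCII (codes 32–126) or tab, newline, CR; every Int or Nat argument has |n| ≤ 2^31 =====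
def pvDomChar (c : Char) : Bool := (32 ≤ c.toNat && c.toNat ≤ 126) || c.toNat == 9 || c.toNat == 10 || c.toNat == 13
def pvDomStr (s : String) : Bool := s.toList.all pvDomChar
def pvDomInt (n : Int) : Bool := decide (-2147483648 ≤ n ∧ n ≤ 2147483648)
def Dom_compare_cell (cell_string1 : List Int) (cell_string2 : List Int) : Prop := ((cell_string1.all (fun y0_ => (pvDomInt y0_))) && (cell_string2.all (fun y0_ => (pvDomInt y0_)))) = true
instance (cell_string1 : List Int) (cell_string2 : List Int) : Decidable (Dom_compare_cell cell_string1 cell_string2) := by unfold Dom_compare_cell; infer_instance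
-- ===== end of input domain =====

-- B replaces A's greedy destructive matching loop by a pure reversal-invariant counting check (alternative algorithm, same asymptotic cost).

-- ===== PORT A =====
-- convert_cell: two list comprehensions over range(0, len, 2)
def convert_cell (cell_bit_string : List Int) : List (List (List Int)) :=
  let tmp := (PySem.List.pyRange 0 cell_bit_string.length 2).map
      (fun i => PySem.List.slice cell_bit_string (some i) (some (i + 2)))
  (PySem.List.pyRange 0 tmp.length 2).map (fun i => PySem.List.slice tmp (some i) (some (i + 2)))

-- inner 'for block2 in cell2: if …: remove; break' = find the first matching block2
-- (block2[::-1] is List.reverse, PySem.List.slice?_none_none_neg_one)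
def aFindMatch (b1 : List (List Int)) : List (List (List Int)) → Option (List (List Int))
  | [] => none
  | b2 :: rest => if b1 = b2 ∨ b1 = b2.reverse then some b2 else aFindMatch b1 rest

-- outer 'for block1 in cell1' loop, carrying the mutable cell2
def aOuter : List (List (List Int)) → List (List (List Int)) → List (List (List Int))
  | [], cell2 => cell2
  | b1 :: rest, cell2 =>
      match aFindMatch b1 cell2 with
      | some b2 => aOuter rest ((PySem.List.remove? cell2 b2).getD cell2)  -- remove always succeeds: b2 ∈ cell2
      | none => aOuter rest cell2

def compare_cell (cell_string1 : List Int) (cell_string2 : List Int) : Bool :=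
  let cell_genome1 := convert_cell cell_string1
  let cell_genome2 := convert_cell cell_string2
  let cell2 := aOuter cell_genome1 cell_genome2
  if cell2.length > 0 then false else true

-- ===== PORT B =====
-- B's _blocks: one pass, four elements at a time (Python while loop over index i)
def bBlocksAux (s : List Int) (i : Nat) : List (List (List Int)) :=
  if _h : i < s.length then
    let blk : List (List Int) :=
      if i + 2 < s.length then
        [PySem.List.slice s (some (i : Int)) (some ((i : Int) + 2)),
         PySem.List.slice s (some ((i : Int) + 2)) (some ((i : Int) + 4))]
      else [PySem.List.slice s (some (i : Int)) (some ((i : Int) + 2))]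
    blk :: bBlocksAux s (i + 4)
  else []
termination_by s.length - i

def bBlocks (s : List Int) : List (List (List Int)) := bBlocksAux s 0

-- cnt: sum(1 for y in bs if x == y or x == y[::-1])
def bCnt (x : List (List Int)) (bs : List (List (List Int))) : Nat :=
  List.countP (fun y => decide (x = y ∨ x = y.reverse)) bs

def compare_cell_alt (cell_string1 : List Int) (cell_string2 : List Int) : Bool :=
  let bs1 := bBlocks cell_string1
  let bs2 := bBlocks cell_string2
  bs2.all (fun x => decide (bCnt x bs2 ≤ bCnt x bs1))

-- ===== PRECONDITION & SPEC =====
def Spec_compare_cell (cell_string1 : List Int) (cell_string2 : List Int) (out : Bool) : Prop := out = compare_cell_alt cell_string1 cell_string2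
instance (cell_string1 : List Int) (cell_string2 : List Int) (out : Bool) : Decidable (Spec_compare_cell cell_string1 cell_string2 out) := by unfold Spec_compare_cell; infer_instance

-- ===== CLAIM (what is proved, stated in full; the proofs are below) =====
def Claim_equal_compare_cell : Prop := ∀ (cell_string1 : List Int) (cell_string2 : List Int), Dom_compare_cell cell_string1 cell_string2 → Spec_compare_cell cell_string1 cell_string2 (compare_cell cell_string1 cell_string2)

-- ===== LEMMAS AND PROOFS =====

-- generic 2-chunking, the common value of both block extractions
def chunk2 {α : Type} : List α → List (List α)
  | [] => []
  | [a] => [[a]]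
  | a :: b :: r => [a, b] :: chunk2 r

theorem chunk2_ne_nil {α : Type} (l : List α) (h : l ≠ []) :
    chunk2 l = l.take 2 :: chunk2 (l.drop 2) := by
  match l with
  | [] => exact absurd rfl h
  | [a] => rfl
  | a :: b :: r => rfl

theorem pyRange_two_cons (a b : Int) (h : a < b) :
    PySem.List.pyRange a b 2 = a :: PySem.List.pyRange (a + 2) b 2 := by
  rw [PySem.List.pyRange_of_pos a b (by norm_num), PySem.List.pyRange_of_pos (a + 2) b (by norm_num)]
  have h1 : ((b - a + 2 - 1) / 2).toNat =
      (if a + 2 < b then ((b - (a + 2) + 2 - 1) / 2).toNat else 0) + 1 := by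
    split_ifs with h2 <;> omega
  rw [if_pos h, h1, List.range_succ_eq_map]
  simp [List.map_map, Function.comp]
  intro k hk; ring

theorem map_slice_pyRange {α : Type} (s : List α) :
    ∀ (k : Nat), (PySem.List.pyRange k s.length 2).map
      (fun i => PySem.List.slice s (some i) (some (i + 2))) = chunk2 (s.drop k) := by
  intro k
  by_cases h : k < s.length
  · have hcast : ((k : Int) + 2) = ((k + 2 : Nat) : Int) := by push_cast; ring
    have ih := map_slice_pyRange s (k + 2)
    rw [← hcast] at ih
    rw [pyRange_two_cons _ _ (by exact_mod_cast h), List.map_cons, ih]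
    rw [chunk2_ne_nil (s.drop k) (by simp; omega)]
    have e1 : PySem.List.slice s (some (k : Int)) (some ((k : Int) + 2)) = (s.drop k).take 2 := by
      have := PySem.List.slice_natCast_add s k 2
      push_cast at this
      exact this
    have e2 : (s.drop k).drop 2 = s.drop (k + 2) := by rw [List.drop_drop]
    simp only [e1, e2]
  · have h1 : PySem.List.pyRange (k : Int) s.length 2 = [] := by
      rw [PySem.List.pyRange_of_pos _ _ (by norm_num)]
      rw [if_neg (by exact_mod_cast h)]
      simp
    rw [h1, List.drop_eq_nil_of_le (by omega)]
    rfl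
termination_by k => s.length - k
decreasing_by omega

theorem map_slice_pyRange_zero {α : Type} (s : List α) :
    (PySem.List.pyRange 0 s.length 2).map
      (fun i => PySem.List.slice s (some i) (some (i + 2))) = chunk2 s := by
  simpa using map_slice_pyRange s 0

theorem convert_cell_eq (s : List Int) : convert_cell s = chunk2 (chunk2 s) := by
  simp only [convert_cell, map_slice_pyRange_zero]

theorem bBlocksAux_eq (s : List Int) : ∀ (i : Nat), bBlocksAux s i = chunk2 (chunk2 (s.drop i)) := by
  intro i
  rw [bBlocksAux]
  by_cases h : i < s.length
  · rw [dif_pos h, bBlocksAux_eq s (i + 4)]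
    have hd : s.drop i ≠ [] := by simp; omega
    rw [chunk2_ne_nil (chunk2 (s.drop i)) (by rw [chunk2_ne_nil _ hd]; simp)]
    rw [chunk2_ne_nil _ hd]
    by_cases h2 : i + 2 < s.length
    · have hd2 : (s.drop i).drop 2 ≠ [] := by simp [List.drop_drop]; omega
      rw [chunk2_ne_nil _ hd2]
      simp only [if_pos h2, List.drop_succ_cons, List.take_succ_cons]
      have e1 : PySem.List.slice s (some (i : Int)) (some ((i : Int) + 2)) = (s.drop i).take 2 := by
        have := PySem.List.slice_natCast_add s i 2; simpa using this
      have e2 : PySem.List.slice s (some ((i : Int) + 2)) (some ((i : Int) + 4)) = ((s.drop i).drop 2).take 2 := by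
        have := PySem.List.slice_natCast_add s (i + 2) 2
        push_cast at this ⊢
        rw [show (i : Int) + 2 + 2 = (i : Int) + 4 by ring] at this
        simp [this, List.drop_drop]
      rw [e1, e2]
      have e3 : (s.drop i).drop 2 = s.drop (i + 2) := by rw [List.drop_drop]
      have e4 : (s.drop (i + 2)).drop 2 = s.drop (i + 4) := by rw [List.drop_drop]
      simp [e3, e4]
    · have hd2 : (s.drop i).drop 2 = [] := by
        apply List.drop_eq_nil_of_le; simp; omega
      rw [hd2]
      simp only [if_neg h2]
      have e1 : PySem.List.slice s (some (i : Int)) (some ((i : Int) + 2)) = (s.drop i).take 2 := by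
        have := PySem.List.slice_natCast_add s i 2; simpa using this
      rw [e1]
      have e5 : s.drop (i + 4) = [] := List.drop_eq_nil_of_le (by omega)
      rw [e5]
      simp [chunk2]
  · rw [dif_neg h, List.drop_eq_nil_of_le (by omega)]
    rfl
termination_by i => s.length - i
decreasing_by omega

theorem bBlocks_eq_convert (s : List Int) : bBlocks s = convert_cell s := by
  rw [bBlocks, bBlocksAux_eq s 0, List.drop_zero, convert_cell_eq]

-- the matching relation is an equivalence
def M (x y : List (List Int)) : Prop := x = y ∨ x = y.reverse

theorem M_symm {x y : List (List Int)} (h : M x y) : M y x := by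
  rcases h with h | h
  · exact Or.inl h.symm
  · right; rw [h, List.reverse_reverse]

theorem M_trans {x y z : List (List Int)} (h1 : M x y) (h2 : M y z) : M x z := by
  rcases h1 with h1 | h1 <;> rcases h2 with h2 | h2
  · exact Or.inl (h1.trans h2)
  · right; rw [h1, h2]
  · right; rw [h1, h2]
  · left; rw [h1, h2, List.reverse_reverse]

theorem bCnt_congr {x y : List (List Int)} (h : M x y) (l : List (List (List Int))) :
    bCnt x l = bCnt y l := by
  unfold bCnt
  apply List.countP_congr
  intro z _
  simp only [decide_eq_true_eq]
  constructor
  · intro hz; exact M_trans (M_symm h) hz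
  · intro hz; exact M_trans h hz

theorem bCnt_cons (x b : List (List Int)) (l : List (List (List Int))) :
    bCnt x (b :: l) = (if x = b ∨ x = b.reverse then 1 else 0) + bCnt x l := by
  unfold bCnt
  rw [List.countP_cons]
  by_cases h : x = b ∨ x = b.reverse
  · rw [if_pos h, if_pos (by simpa using h)]
    omega
  · rw [if_neg h, if_neg (by simpa using h)]
    omega

theorem bCnt_append (x : List (List Int)) (l1 l2 : List (List (List Int))) :
    bCnt x (l1 ++ l2) = bCnt x l1 + bCnt x l2 := by
  unfold bCnt; rw [List.countP_append]

theorem bCnt_pos_of_mem {x : List (List Int)} {l : List (List (List Int))} (h : x ∈ l) :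
    0 < bCnt x l := by
  unfold bCnt
  apply List.countP_pos_iff.mpr
  exact ⟨x, h, by simp⟩

theorem exists_of_bCnt_pos {x : List (List Int)} {l : List (List (List Int))}
    (h : 0 < bCnt x l) : ∃ y ∈ l, M x y := by
  unfold bCnt at h
  obtain ⟨y, hy, hp⟩ := List.countP_pos_iff.mp h
  exact ⟨y, hy, by simpa [M] using hp⟩

theorem aFindMatch_none {b1 : List (List Int)} {l : List (List (List Int))} :
    aFindMatch b1 l = none ↔ ∀ y ∈ l, ¬ M b1 y := by
  induction l with
  | nil => simp [aFindMatch]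
  | cons b2 rest ih =>
    rw [aFindMatch]
    split_ifs with h
    · simp only [M]
      constructor
      · intro h'; cases h'
      · intro h'; exact absurd h (h' b2 List.mem_cons_self)
    · simp only [List.mem_cons]
      constructor
      · intro h' y hy
        rcases hy with rfl | hy
        · exact h
        · exact ih.mp h' y hy
      · intro h'; exact ih.mpr (fun y hy => h' y (Or.inr hy))

theorem aFindMatch_some {b1 b2 : List (List Int)} {l : List (List (List Int))}
    (h : aFindMatch b1 l = some b2) :
    ∃ pre post, l = pre ++ b2 :: post ∧ (∀ y ∈ pre, ¬ M b1 y) ∧ M b1 b2 := by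
  induction l with
  | nil => simp [aFindMatch] at h
  | cons b rest ih =>
    rw [aFindMatch] at h
    split_ifs at h with hm
    · cases h
      exact ⟨[], rest, rfl, by simp, hm⟩
    · obtain ⟨pre, post, heq, hpre, hmb⟩ := ih h
      refine ⟨b :: pre, post, by rw [heq]; rfl, ?_, hmb⟩
      intro y hy
      rcases List.mem_cons.mp hy with rfl | hy
      · exact hm
      · exact hpre y hy

-- the heart: A's greedy removal loop empties cell2 iff every class is covered by counts
theorem aOuter_empty_iff : ∀ (l1 l2 : List (List (List Int))),
    (aOuter l1 l2 = [] ↔ ∀ b ∈ l2, bCnt b l2 ≤ bCnt b l1) := by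
  intro l1
  induction l1 with
  | nil =>
    intro l2
    rw [aOuter]
    constructor
    · intro h; rw [h]; intro b hb; cases hb
    · intro h
      cases l2 with
      | nil => rfl
      | cons b rest =>
        have hle := h b List.mem_cons_self
        have hp := bCnt_pos_of_mem (List.mem_cons_self (a := b) (l := rest))
        have h0 : bCnt b ([] : List (List (List Int))) = 0 := rfl
        exact ((by omega : False)).elim
  | cons b1 rest ih =>
    intro l2
    rw [aOuter]
    cases hfind : aFindMatch b1 l2 with
    | none =>
      simp only []
      rw [ih l2]
      have hno := aFindMatch_none.mp hfind
      constructor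
      · intro h b hb
        rw [bCnt_cons]
        have hnm : ¬ M b b1 := fun hm => hno b hb (M_symm hm)
        rw [if_neg (show ¬ (b = b1 ∨ b = b1.reverse) from hnm)]
        have := h b hb
        omega
      · intro h b hb
        have hle := h b hb
        rw [bCnt_cons] at hle
        have hnm : ¬ M b b1 := fun hm => hno b hb (M_symm hm)
        rw [if_neg (show ¬ (b = b1 ∨ b = b1.reverse) from hnm)] at hle
        omega
    | some b2 =>
      obtain ⟨pre, post, heq, hpre, hm⟩ := aFindMatch_some hfind
      have hb2mem : b2 ∈ l2 := by rw [heq]; exact List.mem_append_right _ List.mem_cons_self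
      have hremove : (PySem.List.remove? l2 b2).getD l2 = pre ++ post := by
        -- b2 ∉ pre: a copy of b2 in pre would itself have matched b1
        have hnotpre : b2 ∉ pre := fun hmem => hpre b2 hmem hm
        rw [PySem.List.remove?_eq_some_erase l2 b2 hb2mem, Option.getD_some, heq,
          List.erase_append_right _ hnotpre, List.erase_cons_head]
      simp only [hremove]
      rw [ih (pre ++ post)]
      -- pointwise bookkeeping
      have key : ∀ b, bCnt b l2 = bCnt b (pre ++ post) + (if b = b2 ∨ b = b2.reverse then 1 else 0) := by
        intro b
        rw [heq, bCnt_append, bCnt_append, bCnt_cons]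
        omega
      have same_ite : ∀ b, (if b = b2 ∨ b = b2.reverse then (1:Nat) else 0) = (if b = b1 ∨ b = b1.reverse then 1 else 0) := by
        intro b
        by_cases h : b = b2 ∨ b = b2.reverse
        · rw [if_pos h, if_pos (show b = b1 ∨ b = b1.reverse from M_trans h (M_symm hm))]
        · rw [if_neg h, if_neg (show ¬ (b = b1 ∨ b = b1.reverse) from
            fun h' => h (M_trans (show M b b1 from h') hm))]
      constructor
      · intro h b hb
        rw [key b, bCnt_cons, same_ite b]
        rw [heq, List.mem_append, List.mem_cons] at hb
        rcases hb with hb | hb | hb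
        · have := h b (List.mem_append_left _ hb); omega
        · subst hb
          by_cases hz : 0 < bCnt b (pre ++ post)
          · obtain ⟨y, hy, hmy⟩ := exists_of_bCnt_pos hz
            have := h y hy
            rw [bCnt_congr hmy (pre ++ post), bCnt_congr hmy rest]
            omega
          · omega
        · have := h b (List.mem_append_right _ hb); omega
      · intro h b hb
        have hbl2 : b ∈ l2 := by
          rw [heq, List.mem_append, List.mem_cons]
          rcases List.mem_append.mp hb with hb | hb
          · exact Or.inl hb
          · exact Or.inr (Or.inr hb)
        have := h b hbl2
        rw [key b, bCnt_cons, same_ite b] at this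
        omega

theorem compare_cell_eq_alt (s1 s2 : List Int) : compare_cell s1 s2 = compare_cell_alt s1 s2 := by
  rw [Bool.eq_iff_iff]
  unfold compare_cell compare_cell_alt
  simp only [bBlocks_eq_convert, gt_iff_lt, List.all_eq_true, decide_eq_true_eq]
  rw [← aOuter_empty_iff (convert_cell s1) (convert_cell s2)]
  cases aOuter (convert_cell s1) (convert_cell s2) with
  | nil => simp
  | cons a t => simp

-- ===== VERDICT (by name: the statement is the Claim_ definition above) =====
theorem compare_cell_spec : Claim_equal_compare_cell := by
  intro s1 s2 _
  unfold Spec_compare_cell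
  exact compare_cell_eq_alt s1 s2
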